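-- pv_equiv track=rewrite | github.com/runcible-spoon/launch_school_exercises | py110-119_small_problems/easy_1/11_conver_a_signed_number_to_a_string.py | signed_integer_to_string
-- ===== SOURCE A (Python) =====
-- DIGITS = ['0', '1', '2', '3', '4', '5', '6', '7', '8', '9']
--
-- def signed_integer_to_string(number):
--     result = ''
--
--     negative = False
--
--     if number < 0:
--         negative = True
--
--     if number == 0:
--         return '0'
--
--     number = abs(number)
--
--     while number > 0:
--         number, remainder = divmod(number, 10)
--         result = DIGITS[remainder] + result
--
--     return '+' + result if not negative else '-' + result
-- ===== SOURCE B (Python) =====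
-- def signed_integer_to_string(number):
--     if number == 0:
--         return '0'
--     sign = '-' if number < 0 else '+'
--     return sign + str(abs(number))
-- ===== Notes on version B (the rewrite author's own statement) =====
-- stated objective: idiomatic
-- what changed: Replaces the manual divmod digit-extraction loop (prepending DIGITS entries one at a time) with a single built-in str(abs(number)) call plus a sign prefix; no loop remains.
import Mathlib
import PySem

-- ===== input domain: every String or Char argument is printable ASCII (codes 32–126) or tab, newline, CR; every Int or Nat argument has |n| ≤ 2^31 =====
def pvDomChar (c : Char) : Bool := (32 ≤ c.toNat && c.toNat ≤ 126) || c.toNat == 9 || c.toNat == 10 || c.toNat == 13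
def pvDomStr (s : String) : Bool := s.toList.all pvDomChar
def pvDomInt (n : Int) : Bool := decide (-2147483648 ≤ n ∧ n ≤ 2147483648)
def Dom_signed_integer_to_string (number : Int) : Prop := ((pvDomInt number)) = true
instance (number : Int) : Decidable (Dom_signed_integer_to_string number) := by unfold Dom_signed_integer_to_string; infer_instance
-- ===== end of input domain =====

-- B replaces A's manual divmod digit-extraction loop with one library decimal conversion plus a sign prefix (idiomatic rewrite, same behaviour).


-- ===== PORT A =====
def pvDIGITS : List String := ["0", "1", "2", "3", "4", "5", "6", "7", "8", "9"]

-- the 'while number > 0' loop of A: number, remainder = divmod(number, 10); result = DIGITS[remainder] + result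
def pvLoopA (number : Int) (result : String) : String :=
  if _h : 0 < number then
    pvLoopA (PySem.Int.floordiv number 10)
      (PySem.List.pyGetD pvDIGITS (PySem.Int.mod number 10) "" ++ result)
  else result
termination_by number.toNat
decreasing_by
  simp only [PySem.Int.floordiv]
  rw [Int.fdiv_eq_ediv_of_nonneg _ (by omega)]
  omega

def signed_integer_to_string (number : Int) : String :=
  let result := ""
  let negative := false
  let negative := if number < 0 then true else negative
  if number = 0 then "0"
  else
    let number := |number|
    let result := pvLoopA number result
    if !negative then "+" ++ result else "-" ++ result

-- ===== PORT B =====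
def signed_integer_to_string_alt (number : Int) : String :=
  if number = 0 then "0"
  else
    let sign := if number < 0 then "-" else "+"
    sign ++ PySem.Int.toStr |number|

-- ===== PRECONDITION & SPEC =====
def Spec_signed_integer_to_string (number : Int) (out : String) : Prop := out = signed_integer_to_string_alt number
instance (number : Int) (out : String) : Decidable (Spec_signed_integer_to_string number out) := by unfold Spec_signed_integer_to_string; infer_instance

-- ===== CLAIM (what is proved, stated in full; the proofs are below) =====
def Claim_equal_signed_integer_to_string : Prop := ∀ (number : Int), Dom_signed_integer_to_string number → Spec_signed_integer_to_string number (signed_integer_to_string number)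

-- ===== LEMMAS AND PROOFS =====

-- accumulator of Nat.toDigitsCore factors out
lemma toDigitsCore_shift (b : Nat) : ∀ (f n : Nat) (acc : List Char),
    Nat.toDigitsCore b f n acc = Nat.toDigitsCore b f n [] ++ acc := by
  intro f
  induction f with
  | zero => intro n acc; simp [Nat.toDigitsCore]
  | succ f ih =>
    intro n acc
    simp only [Nat.toDigitsCore]
    by_cases h : n / b = 0
    · simp [h]
    · simp only [h, if_false]
      rw [ih (n / b) ((n % b).digitChar :: acc), ih (n / b) [(n % b).digitChar]]
      simp

lemma pyDigit_eq (r : Nat) (hr : r < 10) :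
    PySem.List.pyGetD pvDIGITS ((r : Nat) : Int) "" = String.ofList [r.digitChar] := by
  interval_cases r <;> rfl

lemma pvLoopA_eq_toDigitsCore : ∀ (f m : Nat), 0 < m → m < f → ∀ (res : String),
    pvLoopA (m : Int) res = String.ofList (Nat.toDigitsCore 10 f m []) ++ res := by
  intro f
  induction f with
  | zero => omega
  | succ f ih =>
    intro m hm hmf res
    rw [pvLoopA]
    simp only [dif_pos (by exact_mod_cast hm : (0:Int) < (m:Int))]
    rw [show (10 : Int) = ((10 : Nat) : Int) from rfl,
      PySem.Int.floordiv_natCast m 10, PySem.Int.mod_natCast m 10,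
      pyDigit_eq (m % 10) (Nat.mod_lt _ (by norm_num))]
    simp only [Nat.toDigitsCore]
    by_cases h : m / 10 = 0
    · rw [h]
      simp only [Nat.cast_zero]
      rw [pvLoopA]
      simp
    · simp only [h, if_false]
      rw [ih (m / 10) (Nat.pos_of_ne_zero h) (by omega)]
      rw [toDigitsCore_shift 10 f (m / 10) [(m % 10).digitChar]]
      rw [String.ofList_append, String.append_assoc]

lemma pvLoopA_eq_toStr (m : Nat) (hm : 0 < m) (res : String) :
    pvLoopA (m : Int) res = PySem.Int.toStr (m : Int) ++ res := by
  rw [pvLoopA_eq_toDigitsCore (m + 1) m hm (by omega) res]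
  simp [PySem.Int.toStr, PySem.Int.toChars, Nat.toDigits,
    (by exact_mod_cast hm.not_gt : ¬ ((m : Int) < 0))]

-- ===== VERDICT (by name: the statement is the Claim_ definition above) =====
theorem signed_integer_to_string_spec : Claim_equal_signed_integer_to_string := by
  intro number _
  unfold Spec_signed_integer_to_string signed_integer_to_string signed_integer_to_string_alt
  by_cases h0 : number = 0
  · simp [h0]
  · simp only [if_neg h0]
    have habs : |number| = ((number.natAbs : Nat) : Int) := Int.abs_eq_natAbs number
    have hpos : 0 < number.natAbs := by omega
    rw [habs, pvLoopA_eq_toStr number.natAbs hpos ""]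
    by_cases hneg : number < 0
    · simp [hneg]
    · simp [hneg]
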